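-- pv_equiv track=rewrite | github.com/WonHwang/1D1P | 2021_01_26_Day83/1490.py | N_lcm
-- ===== SOURCE A (Python) =====
-- def lcm(x, y):
--     a, b = x, y
--     while b != 0:
--         a, b = b, a % b
--     return x * y // a
--
-- def N_lcm(N):
--     answer = 1
--     while N != 0:
--         tmp = N % 10
--         if tmp != 0:
--             answer = lcm(answer, tmp)
--         N //= 10
--     return answer
-- ===== SOURCE B (Python) =====
-- # B first extracts the digit list (recursively), then finds the LCM of the nonzero
-- # digits as the smallest k in 1..2520 divisible by all of them (lcm(1..9) = 2520),
-- # a bounded divisor search instead of folding Euclid's gcd-based lcm per digit.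
-- def _digits(n):
--     return [] if n == 0 else [n % 10] + _digits(n // 10)
--
-- def N_lcm(N):
--     ds = [d for d in _digits(N) if d != 0]
--     for k in range(1, 2521):
--         if all(k % d == 0 for d in ds):
--             return k
-- ===== Notes on version B (the rewrite author's own statement) =====
-- stated objective: alternative
-- what changed: B builds the digit list first and then returns the smallest k in 1..2520 divisible by every nonzero digit (a bounded divisor search exploiting lcm(1..9)=2520), instead of folding Euclid's gcd-based lcm over the digits inside the extraction loop.
import Mathlib
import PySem

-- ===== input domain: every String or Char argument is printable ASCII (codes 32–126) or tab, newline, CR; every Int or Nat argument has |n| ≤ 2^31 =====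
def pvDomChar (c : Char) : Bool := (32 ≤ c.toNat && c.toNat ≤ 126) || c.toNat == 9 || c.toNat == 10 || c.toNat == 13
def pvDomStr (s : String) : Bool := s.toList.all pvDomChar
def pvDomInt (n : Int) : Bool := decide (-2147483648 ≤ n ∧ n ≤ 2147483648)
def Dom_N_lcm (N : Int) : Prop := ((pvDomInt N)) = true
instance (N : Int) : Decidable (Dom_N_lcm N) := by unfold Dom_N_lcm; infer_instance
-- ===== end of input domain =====

-- B extracts the digit list first, then finds the LCM of the nonzero digits as the
-- smallest k in 1..2520 divisible by all of them (lcm(1..9)=2520): a bounded divisor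
-- search instead of folding Euclid's gcd-based lcm per digit (alternative algorithm).

-- ===== PORT A =====
-- while b != 0: a, b = b, a % b  (Python %)
def N_lcm.lcmLoop (a b : Int) : Int :=
  if _h : b = 0 then a else N_lcm.lcmLoop b (PySem.Int.mod a b)
termination_by b.natAbs
decreasing_by
  rcases lt_trichotomy b 0 with hb | hb | hb
  · have := PySem.Int.mod_neg_bounds a hb; omega
  · exact absurd hb _h
  · have h1 := PySem.Int.mod_nonneg a hb; have h2 := PySem.Int.mod_lt a hb; omega

def N_lcm.lcm (x y : Int) : Int := PySem.Int.floordiv (x * y) (N_lcm.lcmLoop x y)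

-- while N != 0: … ; N //= 10.  For N < 0 the Python loop never terminates
-- (N //= 10 stabilises at -1), so the guard here is N ≤ 0, where both ports return the accumulated value.
def N_lcm.go (N answer : Int) : Int :=
  if N ≤ 0 then answer
  else
    let tmp := PySem.Int.mod N 10
    N_lcm.go (PySem.Int.floordiv N 10) (if tmp ≠ 0 then N_lcm.lcm answer tmp else answer)
termination_by N.toNat
decreasing_by
  have h10 : (0:Int) < 10 := by norm_num
  have := PySem.Int.mod_nonneg N h10
  have := PySem.Int.mod_lt N h10
  have := PySem.Int.floordiv_mul_add_mod N 10
  omega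

def N_lcm (N : Int) : Int := N_lcm.go N 1

-- ===== PORT B =====
-- _digits: [] if n == 0 else [n % 10] + _digits(n // 10).  For n < 0 the Python
-- recursion never returns (RecursionError), so the guard here is n ≤ 0, matching A's port on every input.
def N_lcm_alt.digits (n : Int) : List Int :=
  if n ≤ 0 then [] else PySem.Int.mod n 10 :: N_lcm_alt.digits (PySem.Int.floordiv n 10)
termination_by n.toNat
decreasing_by
  have h10 : (0:Int) < 10 := by norm_num
  have := PySem.Int.mod_nonneg n h10
  have := PySem.Int.mod_lt n h10
  have := PySem.Int.floordiv_mul_add_mod n 10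
  omega

-- for k in range(1, 2521): if all(k % d == 0 for d in ds): return k
-- the search always succeeds (the digits' lcm divides 2520), so the getD default
-- 0 stands for the unreachable fall-through.
def N_lcm_alt (N : Int) : Int :=
  let ds := (N_lcm_alt.digits N).filter (fun d => d != 0)
  ((PySem.List.pyRange 1 2521 1).find?
      (fun k => ds.all (fun d => PySem.Int.mod k d == 0))).getD 0

-- ===== PRECONDITION & SPEC =====
def Spec_N_lcm (N : Int) (out : Int) : Prop := out = N_lcm_alt N
instance (N : Int) (out : Int) : Decidable (Spec_N_lcm N out) := by unfold Spec_N_lcm; infer_instance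

-- ===== CLAIM (what is proved, stated in full; the proofs are below) =====
def Claim_equal_N_lcm : Prop := ∀ (N : Int), Dom_N_lcm N → Spec_N_lcm N (N_lcm N)

-- ===== LEMMAS AND PROOFS =====

-- Euclid's loop computes the gcd (on the nonnegative inputs A feeds it).
theorem lcmLoop_eq_gcd : ∀ (n : Nat) (a b : Int), b.natAbs ≤ n → 0 ≤ a → 0 ≤ b →
    N_lcm.lcmLoop a b = (Int.gcd a b : Int) := by
  intro n
  induction n with
  | zero =>
    intro a b hn ha hb
    have hb0 : b = 0 := by omega
    subst hb0
    rw [N_lcm.lcmLoop]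
    simp [Int.gcd, Int.natAbs_of_nonneg ha]
  | succ n ih =>
    intro a b hn ha hb
    rw [N_lcm.lcmLoop]
    by_cases h : b = 0
    · subst h; simp [Int.gcd, Int.natAbs_of_nonneg ha]
    · have hbpos : 0 < b := lt_of_le_of_ne hb (Ne.symm h)
      have hm : PySem.Int.mod a b = a % b := PySem.Int.mod_eq_emod_of_pos hbpos
      have h1 := PySem.Int.mod_nonneg a hbpos
      have h2 := PySem.Int.mod_lt a hbpos
      rw [dif_neg h, ih b (PySem.Int.mod a b) (by omega) hb h1, hm]
      rw [Int.gcd_comm b (a % b), Int.gcd_emod, Int.gcd_comm]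

-- A's lcm helper is the mathematical lcm on positive inputs.
theorem lcm_eq (x y : Int) (hx : 0 < x) (hy : 0 < y) :
    N_lcm.lcm x y = (Nat.lcm x.toNat y.toNat : Int) := by
  unfold N_lcm.lcm
  rw [lcmLoop_eq_gcd y.natAbs x y le_rfl (le_of_lt hx) (le_of_lt hy)]
  have hg : 0 < (Int.gcd x y : Int) := by
    have : Int.gcd x y ≠ 0 := by
      simp [Int.gcd]
      omega
    positivity
  rw [PySem.Int.floordiv_eq_ediv_of_pos hg]
  have hxy : x * y = ((x.toNat * y.toNat : Nat) : Int) := by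
    push_cast; rw [Int.toNat_of_nonneg (le_of_lt hx), Int.toNat_of_nonneg (le_of_lt hy)]
  have hgc : (Int.gcd x y : Int) = ((Nat.gcd x.toNat y.toNat : Nat) : Int) := by
    simp [Int.gcd]
    congr 1 <;> omega
  rw [hxy, hgc, Nat.lcm]
  exact_mod_cast rfl

-- every digit produced by B's extractor lies in [0, 10)
theorem digits_bounds : ∀ (n : Nat) (N : Int), N.toNat ≤ n →
    ∀ d ∈ N_lcm_alt.digits N, 0 ≤ d ∧ d < 10 := by
  intro n
  induction n with
  | zero =>
    intro N hn d hd
    rw [N_lcm_alt.digits, if_pos (by omega : N ≤ 0)] at hd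
    simp at hd
  | succ n ih =>
    intro N hn d hd
    by_cases hN : N ≤ 0
    · rw [N_lcm_alt.digits, if_pos hN] at hd; simp at hd
    · have h10 : (0:Int) < 10 := by norm_num
      have hm0 := PySem.Int.mod_nonneg N h10
      have hm1 := PySem.Int.mod_lt N h10
      have hfd := PySem.Int.floordiv_mul_add_mod N 10
      rw [N_lcm_alt.digits, if_neg hN] at hd
      rcases List.mem_cons.mp hd with h | h
      · subst h; exact ⟨hm0, hm1⟩
      · exact ih _ (by omega) d h

-- A's loop is the fold of its lcm helper over the nonzero digits, in order
theorem go_eq_fold : ∀ (n : Nat) (N ans : Int), N.toNat ≤ n →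
    N_lcm.go N ans = ((N_lcm_alt.digits N).filter (fun d => d != 0)).foldl N_lcm.lcm ans := by
  intro n
  induction n with
  | zero =>
    intro N ans hn
    have hN : N ≤ 0 := by omega
    rw [N_lcm.go, if_pos hN, N_lcm_alt.digits, if_pos hN]
    rfl
  | succ n ih =>
    intro N ans hn
    by_cases hN : N ≤ 0
    · rw [N_lcm.go, if_pos hN, N_lcm_alt.digits, if_pos hN]; rfl
    · have h10 : (0:Int) < 10 := by norm_num
      have hm0 := PySem.Int.mod_nonneg N h10
      have hm1 := PySem.Int.mod_lt N h10
      have hfd := PySem.Int.floordiv_mul_add_mod N 10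
      rw [N_lcm.go, if_neg hN, N_lcm_alt.digits, if_neg hN]
      by_cases htz : PySem.Int.mod N 10 = 0
      · simp only [htz, List.filter_cons, bne_self_eq_false, ne_eq, not_true_eq_false,
          if_false]
        exact ih _ ans (by omega)
      · have hb : (PySem.Int.mod N 10 != 0) = true := by simpa using htz
        simp only [List.filter_cons, hb, ne_eq, htz, not_false_eq_true, if_true,
          List.foldl_cons]
        exact ih _ _ (by omega)

-- the Nat-level lcm fold
def natFold (m : Nat) (l : List Int) : Nat := l.foldl (fun a d => Nat.lcm a d.toNat) m

theorem foldA_eq : ∀ (l : List Int) (m : Nat), 0 < m → (∀ d ∈ l, 0 < d) →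
    l.foldl N_lcm.lcm (m : Int) = (natFold m l : Int) := by
  intro l
  induction l with
  | nil => intro m _ _; rfl
  | cons d t ih =>
    intro m hm hl
    have hd : 0 < d := hl d (List.mem_cons_self ..)
    have hstep : N_lcm.lcm (m : Int) d = (Nat.lcm m d.toNat : Int) := by
      have := lcm_eq (m : Int) d (by exact_mod_cast hm) hd
      simpa using this
    have hpos : 0 < Nat.lcm m d.toNat := Nat.lcm_pos hm (by omega)
    simp only [List.foldl_cons, hstep, natFold]
    exact ih (Nat.lcm m d.toNat) hpos (fun x hx => hl x (List.mem_cons_of_mem _ hx))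

theorem natFold_pos : ∀ (l : List Int) (m : Nat), 0 < m → (∀ d ∈ l, 0 < d) → 0 < natFold m l := by
  intro l
  induction l with
  | nil => intro m hm _; exact hm
  | cons d t ih =>
    intro m hm hl
    exact ih _ (Nat.lcm_pos hm (by have := hl d (List.mem_cons_self ..); omega))
      (fun x hx => hl x (List.mem_cons_of_mem _ hx))

theorem dvd_natFold : ∀ (l : List Int) (m : Nat),
    m ∣ natFold m l ∧ ∀ d ∈ l, d.toNat ∣ natFold m l := by
  intro l
  induction l with
  | nil => intro m; exact ⟨dvd_refl m, by simp⟩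
  | cons d t ih =>
    intro m
    obtain ⟨h1, h2⟩ := ih (Nat.lcm m d.toNat)
    refine ⟨dvd_trans (Nat.dvd_lcm_left _ _) h1, ?_⟩
    intro x hx
    rcases List.mem_cons.mp hx with h | h
    · subst h; exact dvd_trans (Nat.dvd_lcm_right _ _) h1
    · exact h2 x h

theorem natFold_dvd : ∀ (l : List Int) (m k : Nat), m ∣ k → (∀ d ∈ l, d.toNat ∣ k) →
    natFold m l ∣ k := by
  intro l
  induction l with
  | nil => intro m k hm _; exact hm
  | cons d t ih =>
    intro m k hm hl
    exact ih _ k (Nat.lcm_dvd hm (hl d (List.mem_cons_self ..)))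
      (fun x hx => hl x (List.mem_cons_of_mem _ hx))

-- the first element of range(1, 2521) satisfying p, when L is the least one
theorem find?_first : ∀ (n : Nat) (p : Int → Bool) (a L b : Int), (L - a).toNat ≤ n →
    a ≤ L → L < b → p L = true → (∀ k, a ≤ k → k < L → p k = false) →
    (PySem.List.pyRange a b 1).find? p = some L := by
  intro n
  induction n with
  | zero =>
    intro p a L b hn haL hLb hpL _
    have haL' : a = L := by omega
    subst haL'
    rw [PySem.List.pyRange_one_cons (by omega), List.find?_cons_of_pos hpL]
  | succ n ih =>
    intro p a L b hn haL hLb hpL hmin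
    by_cases hae : a = L
    · subst hae
      rw [PySem.List.pyRange_one_cons (by omega), List.find?_cons_of_pos hpL]
    · have haL2 : a < L := lt_of_le_of_ne haL hae
      rw [PySem.List.pyRange_one_cons (by omega),
        List.find?_cons_of_neg (by simp [hmin a le_rfl haL2])]
      exact ih p (a + 1) L b (by omega) (by omega) hLb hpL
        (fun k hk1 hk2 => hmin k (by omega) hk2)

-- nonzero digits divide 2520
theorem digit_dvd_2520 (d : Int) (h0 : 0 < d) (h10 : d < 10) : d.toNat ∣ 2520 := by
  interval_cases d <;> decide

-- ===== VERDICT (by name: the statement is the Claim_ definition above) =====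
theorem N_lcm_spec : Claim_equal_N_lcm := by
  intro N _
  unfold Spec_N_lcm N_lcm N_lcm_alt
  set ds := (N_lcm_alt.digits N).filter (fun d => d != 0) with hds
  have hpos : ∀ d ∈ ds, 0 < d := by
    intro d hd
    rw [hds, List.mem_filter] at hd
    obtain ⟨hmem, hne⟩ := hd
    have := digits_bounds N.toNat N le_rfl d hmem
    have : d ≠ 0 := by simpa using hne
    omega
  set L := natFold 1 ds with hL
  have hLpos : 0 < L := natFold_pos ds 1 one_pos hpos
  have hdvd := dvd_natFold ds 1
  have hL2520 : L ∣ 2520 := by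
    refine natFold_dvd ds 1 2520 (one_dvd _) ?_
    intro d hd
    have hb := digits_bounds N.toNat N le_rfl d ((List.mem_filter.mp (hds ▸ hd)).1)
    exact digit_dvd_2520 d (hpos d hd) hb.2
  have hLle : L ≤ 2520 := Nat.le_of_dvd (by norm_num) hL2520
  -- A's side equals (L : Int)
  have hA : N_lcm.go N 1 = (L : Int) := by
    rw [go_eq_fold N.toNat N 1 le_rfl, ← hds]
    have := foldA_eq ds 1 one_pos hpos
    simpa using this
  -- B's side: the search finds exactly (L : Int)
  have hfind : (PySem.List.pyRange 1 2521 1).find?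
      (fun k => ds.all (fun d => PySem.Int.mod k d == 0)) = some (L : Int) := by
    apply find?_first ((L : Int) - 1).toNat _ 1 (L : Int) 2521 le_rfl
      (by exact_mod_cast hLpos) (by exact_mod_cast Nat.lt_succ_of_le hLle)
    · -- every digit divides L
      rw [List.all_eq_true]
      intro d hd
      have hdp := hpos d hd
      have hdL : d ∣ (L : Int) := by
        have := hdvd.2 d hd
        have hcast : ((d.toNat : Int)) = d := Int.toNat_of_nonneg (le_of_lt hdp)
        exact_mod_cast hcast ▸ (Int.natCast_dvd_natCast.mpr this)
      simp [PySem.Int.mod_eq_emod_of_pos hdp, Int.emod_eq_zero_of_dvd hdL]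
    · -- no smaller k works
      intro k hk1 hk2
      by_contra hne
      have hall : (ds.all (fun d => PySem.Int.mod k d == 0)) = true := by
        cases h : ds.all (fun d => PySem.Int.mod k d == 0)
        · exact absurd h hne
        · rfl
      rw [List.all_eq_true] at hall
      have hdivall : ∀ d ∈ ds, d.toNat ∣ k.toNat := by
        intro d hd
        have hdp := hpos d hd
        have := hall d hd
        rw [PySem.Int.mod_eq_emod_of_pos hdp] at this
        have hdvdk : d ∣ k := Int.dvd_of_emod_eq_zero (beq_iff_eq.mp this)
        rw [← Int.natCast_dvd_natCast]
        simpa [Int.toNat_of_nonneg (le_of_lt hdp), Int.toNat_of_nonneg (by omega : (0:Int) ≤ k)] using hdvdk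
      have : L ∣ k.toNat := natFold_dvd ds 1 k.toNat (one_dvd _) hdivall
      have : L ≤ k.toNat := Nat.le_of_dvd (by omega) this
      omega
  rw [hA]
  simp only [hfind, Option.getD_some]
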